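-- pv_equiv track=rewrite | github.com/miliar/Code_Jam_Webscraper | solutions_python/solutions_year10_round2_nr1/379.py | get_number_mkdirs
-- ===== SOURCE A (Python) =====
-- def get_number_mkdirs(m, ns):
--     lowest_number = len(m)
--     for existing_parts in ns:
--         i = 0
--         while i < len(m):
--             if i == len(existing_parts) or m[i] != existing_parts[i]:
--                 break
--             i += 1
--
--
--         if len(m) - i < lowest_number or lowest_number == -1:
--             lowest_number = len(m) - i
--
--     return lowest_number
-- ===== SOURCE B (Python) =====
-- def get_number_mkdirs(m, ns):
--     # Index every existing prefix once, then find the deepest existing prefix of m.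
--     prefixes = set()
--     for n in ns:
--         for j in range(1, len(n) + 1):
--             prefixes.add(tuple(n[:j]))
--     best = 0
--     for i in range(len(m), 0, -1):
--         if tuple(m[:i]) in prefixes:
--             best = i
--             break
--     return len(m) - best
-- ===== Notes on version B (the rewrite author's own statement) =====
-- stated objective: alternative
-- what changed: B precomputes a set of all prefixes of the existing paths and answers by scanning m's prefixes deepest-first with membership lookups, instead of A's per-path element-by-element comparison loop; B trades speed on long paths (it materialises every prefix) for a declarative index-then-lookup structure.
import Mathlib
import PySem

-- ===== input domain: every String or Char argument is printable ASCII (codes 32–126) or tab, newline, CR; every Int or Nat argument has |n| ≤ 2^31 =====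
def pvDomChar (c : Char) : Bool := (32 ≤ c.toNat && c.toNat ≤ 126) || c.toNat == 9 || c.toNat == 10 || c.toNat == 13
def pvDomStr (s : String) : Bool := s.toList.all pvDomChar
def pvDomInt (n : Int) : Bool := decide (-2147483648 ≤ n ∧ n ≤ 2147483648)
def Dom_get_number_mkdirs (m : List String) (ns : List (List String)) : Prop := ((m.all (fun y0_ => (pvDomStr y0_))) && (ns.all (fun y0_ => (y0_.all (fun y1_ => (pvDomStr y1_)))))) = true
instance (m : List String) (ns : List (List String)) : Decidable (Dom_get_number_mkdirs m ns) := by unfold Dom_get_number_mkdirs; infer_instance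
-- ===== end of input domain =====

-- B builds a set of all prefixes of the existing paths once and finds the deepest
-- existing prefix of m by membership lookups (alternative decomposition, same cost class).

-- ===== PORT A =====
-- the inner 'while i < len(m): if i == len(existing_parts) or m[i] != existing_parts[i]: break; i += 1'
def aWhile (m parts : List String) (i : Nat) : Nat :=
  if _h : i < m.length then
    if i = parts.length ∨ m.getD i "" ≠ parts.getD i "" then i
    else aWhile m parts (i + 1)
  else i
termination_by m.length - i
decreasing_by omega

def get_number_mkdirs (m : List String) (ns : List (List String)) : Int :=
  ns.foldl
    (fun lowest_number parts =>
      let i := aWhile m parts 0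
      if (m.length : Int) - i < lowest_number ∨ lowest_number = -1 then (m.length : Int) - i
      else lowest_number)
    (m.length : Int)

-- ===== PORT B =====
-- prefixes = set(); for n in ns: for j in range(1, len(n)+1): prefixes.add(tuple(n[:j]))
def buildPrefixes (ns : List (List String)) : PySem.Set (List String) :=
  ns.foldl
    (fun S n => (List.range' 1 n.length).foldl (fun S j => PySem.Set.add S (n.take j)) S)
    PySem.Set.empty

-- for i in range(len(m), 0, -1): if tuple(m[:i]) in prefixes: best = i; break   (best = 0 default)
def bScan (m : List String) (S : PySem.Set (List String)) : Nat → Nat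
  | 0 => 0
  | i + 1 => if PySem.Set.contains S (m.take (i + 1)) then i + 1 else bScan m S i

def get_number_mkdirs_alt (m : List String) (ns : List (List String)) : Int :=
  (m.length : Int) - bScan m (buildPrefixes ns) m.length

-- ===== PRECONDITION & SPEC =====
def Spec_get_number_mkdirs (m : List String) (ns : List (List String)) (out : Int) : Prop := out = get_number_mkdirs_alt m ns
instance (m : List String) (ns : List (List String)) (out : Int) : Decidable (Spec_get_number_mkdirs m ns out) := by unfold Spec_get_number_mkdirs; infer_instance

-- ===== CLAIM (what is proved, stated in full; the proofs are below) =====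
def Claim_equal_get_number_mkdirs : Prop := ∀ (m : List String) (ns : List (List String)), Dom_get_number_mkdirs m ns → Spec_get_number_mkdirs m ns (get_number_mkdirs m ns)

-- ===== LEMMAS AND PROOFS =====

-- length of the common prefix of two lists
def cp : List String → List String → Nat
  | a :: as, b :: bs => if a = b then cp as bs + 1 else 0
  | _, _ => 0

theorem cp_le_left (a b : List String) : cp a b ≤ a.length := by
  induction a generalizing b with
  | nil => cases b <;> simp [cp]
  | cons x as ih =>
    cases b with
    | nil => simp [cp]
    | cons y bs =>
      simp only [cp, List.length_cons]
      split <;> [exact Nat.succ_le_succ (ih bs); omega]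

theorem cp_ge_iff (a b : List String) (i : Nat) :
    i ≤ cp a b ↔ i ≤ a.length ∧ i ≤ b.length ∧ a.take i = b.take i := by
  induction a generalizing b i with
  | nil =>
    cases b <;> cases i <;> simp [cp]
  | cons x as ih =>
    cases b with
    | nil => cases i <;> simp [cp]
    | cons y bs =>
      cases i with
      | zero => simp
      | succ k =>
        by_cases hxy : x = y
        · subst hxy
          have hcp : cp (x :: as) (x :: bs) = cp as bs + 1 := by simp [cp]
          rw [hcp]
          simp only [List.length_cons, List.take_succ_cons, Nat.add_le_add_iff_right,
            List.cons.injEq, true_and]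
          exact ih bs k
        · simp [cp, hxy]

theorem cp_nil_right (a : List String) : cp a [] = 0 := by cases a <;> simp [cp]

theorem aWhile_eq (k : Nat) : ∀ (m parts : List String) (i : Nat), m.length - i ≤ k →
    i ≤ parts.length → aWhile m parts i = i + cp (m.drop i) (parts.drop i) := by
  induction k with
  | zero =>
    intro m parts i hk _
    have hm : m.length ≤ i := by omega
    rw [aWhile]
    simp [Nat.not_lt.mpr hm, List.drop_of_length_le hm, cp]
  | succ k ih =>
    intro m parts i hk hp
    rw [aWhile]
    by_cases hi : i < m.length
    · simp only [dif_pos hi]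
      by_cases hpe : i = parts.length
      · subst hpe
        simp [List.drop_of_length_le (le_refl _), cp_nil_right]
      · have hip : i < parts.length := lt_of_le_of_ne hp hpe
        have hdm : m.drop i = m[i] :: m.drop (i + 1) := List.drop_eq_getElem_cons hi
        have hdp : parts.drop i = parts[i] :: parts.drop (i + 1) := List.drop_eq_getElem_cons hip
        rw [List.getD_eq_getElem m "" hi, List.getD_eq_getElem parts "" hip]
        by_cases heq : m[i] = parts[i]
        · have hcond : ¬(i = parts.length ∨ m[i] ≠ parts[i]) := by
            push_neg; exact ⟨hpe, heq⟩
          rw [if_neg hcond, ih m parts (i + 1) (by omega) (by omega), hdm, hdp]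
          have hstep : cp (m[i] :: m.drop (i + 1)) (parts[i] :: parts.drop (i + 1))
              = cp (m.drop (i + 1)) (parts.drop (i + 1)) + 1 := by simp [cp, heq]
          rw [hstep]; omega
        · rw [if_pos (Or.inr heq), hdm, hdp]
          simp [cp, heq]
    · simp only [dif_neg hi]
      have hm : m.length ≤ i := by omega
      simp [List.drop_of_length_le hm, cp]

theorem aWhile_zero (m parts : List String) : aWhile m parts 0 = cp m parts := by
  have := aWhile_eq m.length m parts 0 (by omega) (Nat.zero_le _)
  simpa using this

-- A's fold step in terms of cp
theorem afun_eq (m : List String) :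
    (fun (lowest_number : Int) (parts : List String) =>
      let i := aWhile m parts 0
      if (m.length : Int) - i < lowest_number ∨ lowest_number = -1 then (m.length : Int) - i
      else lowest_number)
    = (fun (lowest_number : Int) (parts : List String) =>
      if (m.length : Int) - (cp m parts) < lowest_number ∨ lowest_number = -1
      then (m.length : Int) - (cp m parts) else lowest_number) := by
  funext l p
  simp [aWhile_zero]

-- A's fold equals len(m) minus the running max of common-prefix lengths
theorem foldA_eq (m : List String) : ∀ (ns : List (List String)) (c : Nat), c ≤ m.length →
    ns.foldl
      (fun (lowest_number : Int) (parts : List String) =>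
        if (m.length : Int) - (cp m parts) < lowest_number ∨ lowest_number = -1
        then (m.length : Int) - (cp m parts) else lowest_number)
      ((m.length : Int) - c)
    = (m.length : Int) - ns.foldl (fun a n => max a (cp m n)) c := by
  intro ns
  induction ns with
  | nil => intro c _; simp
  | cons n rest ih =>
    intro c hc
    have hcpl : cp m n ≤ m.length := cp_le_left m n
    rw [List.foldl_cons, List.foldl_cons]
    by_cases h : c < cp m n
    · rw [if_pos (Or.inl (by omega))]
      have hmax : max c (cp m n) = cp m n := by omega
      rw [show ((m.length : Int) - (cp m n) : Int) = (m.length : Int) - (max c (cp m n)) from by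
        rw [hmax]]
      exact ih (max c (cp m n)) (by omega)
    · rw [if_neg (by rintro (h' | h') <;> omega)]
      have hmax : max c (cp m n) = c := by omega
      rw [hmax]
      exact ih c hc

theorem maxCp_le (m : List String) : ∀ (ns : List (List String)) (c : Nat), c ≤ m.length →
    ns.foldl (fun a n => max a (cp m n)) c ≤ m.length := by
  intro ns
  induction ns with
  | nil => intro c hc; simpa using hc
  | cons n rest ih =>
    intro c hc
    rw [List.foldl_cons]
    exact ih _ (by have := cp_le_left m n; omega)

theorem maxCp_ge_iff (m : List String) : ∀ (ns : List (List String)) (c i : Nat),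
    i ≤ ns.foldl (fun a n => max a (cp m n)) c ↔ i ≤ c ∨ ∃ n ∈ ns, i ≤ cp m n := by
  intro ns
  induction ns with
  | nil => simp
  | cons n rest ih =>
    intro c i
    rw [List.foldl_cons, ih, le_max_iff]
    constructor
    · rintro ((h | h) | ⟨n', hn', h⟩)
      · exact Or.inl h
      · exact Or.inr ⟨n, List.mem_cons_self, h⟩
      · exact Or.inr ⟨n', List.mem_cons_of_mem n hn', h⟩
    · rintro (h | ⟨n', hn', h⟩)
      · exact Or.inl (Or.inl h)
      · rcases List.mem_cons.mp hn' with rfl | hn''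
        · exact Or.inl (Or.inr h)
        · exact Or.inr ⟨n', hn'', h⟩

theorem mem_buildPrefixes (ns : List (List String)) (x : List String) :
    x ∈ buildPrefixes ns ↔ ∃ n ∈ ns, ∃ j, 1 ≤ j ∧ j ≤ n.length ∧ x = n.take j := by
  unfold buildPrefixes
  have key : ∀ (l : List (List String)) (S : PySem.Set (List String)),
      x ∈ l.foldl (fun S n => (List.range' 1 n.length).foldl (fun S j => PySem.Set.add S (n.take j)) S) S
      ↔ x ∈ S ∨ ∃ n ∈ l, ∃ j, 1 ≤ j ∧ j ≤ n.length ∧ x = n.take j := by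
    intro l
    induction l with
    | nil => simp
    | cons n rest ih =>
      intro S
      simp only [List.foldl_cons, ih, PySem.Set.mem_foldl_add, List.mem_range'_1, List.mem_cons]
      constructor
      · rintro ((h | ⟨j, ⟨h1, h2⟩, h3⟩) | ⟨n', hn', j, h1, h2, h3⟩)
        · exact Or.inl h
        · exact Or.inr ⟨n, Or.inl rfl, j, h1, by omega, h3⟩
        · exact Or.inr ⟨n', Or.inr hn', j, h1, h2, h3⟩
      · rintro (h | ⟨n', (rfl | hn'), j, h1, h2, h3⟩)
        · exact Or.inl (Or.inl h)
        · exact Or.inl (Or.inr ⟨j, ⟨h1, by omega⟩, h3⟩)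
        · exact Or.inr ⟨n', hn', j, h1, h2, h3⟩
  simpa [PySem.Set.empty] using key ns PySem.Set.empty

theorem take_mem_buildPrefixes (m : List String) (ns : List (List String)) (i : Nat)
    (h1 : 1 ≤ i) (h2 : i ≤ m.length) :
    m.take i ∈ buildPrefixes ns ↔ ∃ n ∈ ns, i ≤ cp m n := by
  rw [mem_buildPrefixes]
  constructor
  · rintro ⟨n, hn, j, hj1, hj2, hj3⟩
    have hlen : (m.take i).length = (n.take j).length := by rw [hj3]
    simp only [List.length_take] at hlen
    have hji : j = i := by omega
    subst hji
    exact ⟨n, hn, (cp_ge_iff m n j).mpr ⟨h2, hj2, hj3⟩⟩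
  · rintro ⟨n, hn, hcp⟩
    obtain ⟨ha, hb, hc⟩ := (cp_ge_iff m n i).mp hcp
    exact ⟨n, hn, i, h1, hb, hc⟩

theorem bScan_eq (m : List String) (ns : List (List String)) :
    ∀ (k : Nat), k ≤ m.length → ns.foldl (fun a n => max a (cp m n)) 0 ≤ k →
      bScan m (buildPrefixes ns) k = ns.foldl (fun a n => max a (cp m n)) 0 := by
  intro k
  induction k with
  | zero => intro _ hM; simp [bScan]; omega
  | succ k ih =>
    intro hk hM
    rw [bScan]
    by_cases hmem : m.take (k + 1) ∈ buildPrefixes ns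
    · rw [if_pos ((PySem.Set.contains_iff _ _).mpr hmem)]
      have h1 : k + 1 ≤ ns.foldl (fun a n => max a (cp m n)) 0 :=
        (maxCp_ge_iff m ns 0 (k + 1)).mpr
          (Or.inr ((take_mem_buildPrefixes m ns (k + 1) (by omega) hk).mp hmem))
      omega
    · rw [if_neg (by
        intro hco
        exact hmem ((PySem.Set.contains_iff _ _).mp hco))]
      have hlt : ns.foldl (fun a n => max a (cp m n)) 0 ≤ k := by
        by_contra hgt
        have hM1 : k + 1 ≤ ns.foldl (fun a n => max a (cp m n)) 0 := by omega
        have hex := ((maxCp_ge_iff m ns 0 (k + 1)).mp hM1).resolve_left (by omega)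
        exact hmem ((take_mem_buildPrefixes m ns (k + 1) (by omega) hk).mpr hex)
      exact ih (by omega) hlt

-- ===== VERDICT (by name: the statement is the Claim_ definition above) =====
theorem get_number_mkdirs_spec : Claim_equal_get_number_mkdirs := by
  intro m ns _dom
  unfold Spec_get_number_mkdirs get_number_mkdirs get_number_mkdirs_alt
  rw [afun_eq m, bScan_eq m ns m.length (le_refl _) (maxCp_le m ns 0 (Nat.zero_le _))]
  have h := foldA_eq m ns 0 (Nat.zero_le _)
  simpa using h
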